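-- pv_equiv track=rewrite | github.com/anolik/DNSWatcher | app/checker/diff_engine.py | _extract_spf_all
-- ===== SOURCE A (Python) =====
-- def _extract_spf_all(record: str) -> str | None:
--     """Extract the trailing 'all' mechanism from an SPF record."""
--     for token in reversed(record.split()):
--         if token.endswith("all"):
--             for prefix in ["-", "~", "?", "+"]:
--                 if token == f"{prefix}all":
--                     return token
--             if token == "all":
--                 return "+all"
--     return None
-- ===== SOURCE B (Python) =====
-- VALID_ALL = ("all", "-all", "~all", "?all", "+all")
--
-- def _extract_spf_all(record):
--     matches = [t for t in record.split() if t in VALID_ALL]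
--     if not matches:
--         return None
--     last = matches[-1]
--     return "+all" if last == "all" else last
-- ===== Notes on version B (the rewrite author's own statement) =====
-- stated objective: idiomatic
-- what changed: Replaces the reversed early-return scan with endswith plus an inner prefix loop by a single forward filter of tokens against the five exact 'all' mechanisms, taking the last match and normalising bare 'all' to '+all'.
import Mathlib
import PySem

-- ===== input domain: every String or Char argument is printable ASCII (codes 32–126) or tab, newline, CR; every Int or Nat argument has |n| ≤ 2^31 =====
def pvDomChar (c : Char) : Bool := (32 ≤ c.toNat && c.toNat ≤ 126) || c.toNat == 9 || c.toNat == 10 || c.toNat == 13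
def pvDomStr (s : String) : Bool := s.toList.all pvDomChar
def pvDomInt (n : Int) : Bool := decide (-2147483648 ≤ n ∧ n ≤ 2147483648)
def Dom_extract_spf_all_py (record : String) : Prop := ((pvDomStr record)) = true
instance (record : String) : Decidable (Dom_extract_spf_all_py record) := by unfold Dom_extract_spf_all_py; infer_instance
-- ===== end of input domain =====

-- B replaces A's reversed early-return scan (endswith + inner prefix loop) by a forward
-- filter for the five exact 'all' mechanisms, taking the last match (idiomatic; same cost).

-- ===== PORT A =====
-- the reversed-token loop of A: endswith "all", then the inner prefix loop, then the bare "all" case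
def spfLoopA : List String → Option String
  | [] => none
  | t :: rest =>
    if PySem.Str.endswith t "all" then
      -- inner loop: for prefix in ["-", "~", "?", "+"]: if token == prefix+"all": return token
      if t == "-all" then some t
      else if t == "~all" then some t
      else if t == "?all" then some t
      else if t == "+all" then some t
      else if t == "all" then some "+all"
      else spfLoopA rest
    else spfLoopA rest

def extract_spf_all_py (record : String) : Option String :=
  spfLoopA (PySem.Str.split₀ record).reverse

-- ===== PORT B =====
-- t in VALID_ALL
def spfValid (t : String) : Bool :=
  t == "all" || t == "-all" || t == "~all" || t == "?all" || t == "+all"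

def extract_spf_all_py_alt (record : String) : Option String :=
  let found := (PySem.Str.split₀ record).filter spfValid
  match found.getLast? with
  | none => none
  | some last => some (if last == "all" then "+all" else last)

-- ===== PRECONDITION & SPEC =====
def Spec_extract_spf_all_py (record : String) (out : Option String) : Prop := out = extract_spf_all_py_alt record
instance (record : String) (out : Option String) : Decidable (Spec_extract_spf_all_py record out) := by unfold Spec_extract_spf_all_py; infer_instance

-- ===== CLAIM (what is proved, stated in full; the proofs are below) =====
def Claim_equal_extract_spf_all_py : Prop := ∀ (record : String), Dom_extract_spf_all_py record → Spec_extract_spf_all_py record (extract_spf_all_py record)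

-- ===== LEMMAS AND PROOFS =====

-- A's loop returns the first valid token of its list, normalising "all" to "+all"
theorem spfLoopA_eq_find (l : List String) :
    spfLoopA l = (l.find? spfValid).map (fun t => if t == "all" then "+all" else t) := by
  induction l with
  | nil => rfl
  | cons t rest ih =>
    by_cases hv : spfValid t = true
    · have he : PySem.Str.endswith t "all" = true := by
        simp only [spfValid, Bool.or_eq_true, beq_iff_eq] at hv
        rcases hv with ((((h | h) | h) | h) | h) <;> subst h <;> decide
      simp only [spfLoopA, he, if_true, List.find?_cons, hv]
      simp only [spfValid, Bool.or_eq_true, beq_iff_eq] at hv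
      rcases hv with ((((h | h) | h) | h) | h) <;> subst h <;> rfl
    · have h1 : (t == "-all") = false := by
        by_contra h; simp only [Bool.not_eq_false, beq_iff_eq] at h; subst h; simp [spfValid] at hv
      have h2 : (t == "~all") = false := by
        by_contra h; simp only [Bool.not_eq_false, beq_iff_eq] at h; subst h; simp [spfValid] at hv
      have h3 : (t == "?all") = false := by
        by_contra h; simp only [Bool.not_eq_false, beq_iff_eq] at h; subst h; simp [spfValid] at hv
      have h4 : (t == "+all") = false := by
        by_contra h; simp only [Bool.not_eq_false, beq_iff_eq] at h; subst h; simp [spfValid] at hv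
      have h5 : (t == "all") = false := by
        by_contra h; simp only [Bool.not_eq_false, beq_iff_eq] at h; subst h; simp [spfValid] at hv
      have hv' : spfValid t = false := Bool.not_eq_true _ ▸ hv
      simp only [spfLoopA, h1, h2, h3, h4, h5, List.find?_cons, hv',
        Bool.false_eq_true, if_false]
      split <;> exact ih

theorem find?_eq_head?_filter' (p : String → Bool) (l : List String) :
    l.find? p = (l.filter p).head? := by
  induction l with
  | nil => rfl
  | cons t rest ih =>
    by_cases h : p t = true
    · simp [h]
    · have h' : p t = false := Bool.not_eq_true _ ▸ h
      simp only [List.find?_cons, List.filter_cons, h', Bool.false_eq_true, if_false]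
      exact ih

-- ===== VERDICT (by name: the statement is the Claim_ definition above) =====
theorem extract_spf_all_py_spec : Claim_equal_extract_spf_all_py := by
  intro record _
  unfold Spec_extract_spf_all_py extract_spf_all_py extract_spf_all_py_alt
  rw [spfLoopA_eq_find, find?_eq_head?_filter', List.filter_reverse,
    List.head?_reverse]
  cases h : ((PySem.Str.split₀ record).filter spfValid).getLast? <;> simp [h]
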